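-- pv_equiv track=rewrite | github.com/skaraman/Xursor | main.py | _clean_response_text
-- ===== SOURCE A (Python) =====
-- def _clean_response_text(text):
--     cleaned = " ".join(text.split())
--     replacements = (
--         ("This screenshot shows ", ""),
--         ("This screenshot is ", ""),
--         ("This screenshot contains ", ""),
--         ("This image shows ", ""),
--         ("This image is ", ""),
--         ("This image contains ", ""),
--         ("The screenshot shows ", ""),
--         ("The image shows ", ""),
--     )
--     for prefix, replacement in replacements:
--         if cleaned.lower().startswith(prefix.lower()):
--             cleaned = replacement + cleaned[len(prefix):]
--             break
--     return cleaned.strip()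
-- ===== SOURCE B (Python) =====
-- _PATTERNS = (
--     ["this", "screenshot", "shows"],
--     ["this", "screenshot", "is"],
--     ["this", "screenshot", "contains"],
--     ["this", "image", "shows"],
--     ["this", "image", "is"],
--     ["this", "image", "contains"],
--     ["the", "screenshot", "shows"],
--     ["the", "image", "shows"],
-- )
--
--
-- def _clean_response_text(text):
--     words = text.split()
--     if len(words) > 3 and [w.lower() for w in words[:3]] in _PATTERNS:
--         words = words[3:]
--     return " ".join(words)
-- ===== Notes on version B (the rewrite author's own statement) =====
-- stated objective: simpler
-- what changed: Instead of joining the words into a string and scanning eight candidate string prefixes with lower/startswith/slice, B keeps the word list, compares the lowercased first three words against a table of three-word patterns, drops them on a match, and joins once; the final strip disappears because the join of split words is already stripped.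
import Mathlib
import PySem

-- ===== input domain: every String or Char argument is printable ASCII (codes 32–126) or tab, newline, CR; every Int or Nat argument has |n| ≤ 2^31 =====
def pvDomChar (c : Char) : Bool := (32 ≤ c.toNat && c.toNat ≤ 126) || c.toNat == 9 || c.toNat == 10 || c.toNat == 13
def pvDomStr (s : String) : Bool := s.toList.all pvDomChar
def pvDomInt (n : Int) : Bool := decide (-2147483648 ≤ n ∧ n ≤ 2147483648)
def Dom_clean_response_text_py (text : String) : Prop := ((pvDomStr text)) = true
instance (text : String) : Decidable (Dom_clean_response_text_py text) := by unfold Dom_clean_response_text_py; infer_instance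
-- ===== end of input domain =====

-- B replaces A's join-then-scan-eight-string-prefixes (lower/startswith/slice/strip) by one
-- word-level comparison: lowercase the first three words, look them up in a table of
-- three-word patterns, drop them on a match, and join once (simpler; same O(n) cost).

-- ===== PORT A =====
def pvReplacements : List (String × String) :=
  [("This screenshot shows ", ""), ("This screenshot is ", ""),
   ("This screenshot contains ", ""), ("This image shows ", ""),
   ("This image is ", ""), ("This image contains ", ""),
   ("The screenshot shows ", ""), ("The image shows ", "")]

-- the for-loop with break: first matching prefix is stripped, then the loop stops
def pvCleanLoop : List (String × String) → String → String
  | [], cleaned => cleaned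
  | (pre, repl) :: rest, cleaned =>
    if PySem.Str.startswith (PySem.Str.lower cleaned) (PySem.Str.lower pre) = true then
      repl ++ PySem.Str.slice cleaned (some (PySem.Str.len pre)) none
    else pvCleanLoop rest cleaned

def clean_response_text_py (text : String) : String :=
  PySem.Str.strip (pvCleanLoop pvReplacements (PySem.Str.join " " (PySem.Str.split₀ text)))

-- ===== PORT B =====
def pvPatterns : List (List String) :=
  [["this", "screenshot", "shows"], ["this", "screenshot", "is"],
   ["this", "screenshot", "contains"], ["this", "image", "shows"],
   ["this", "image", "is"], ["this", "image", "contains"],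
   ["the", "screenshot", "shows"], ["the", "image", "shows"]]

def clean_response_text_py_alt (text : String) : String :=
  let words := PySem.Str.split₀ text
  let words' :=
    if 3 < words.length ∧ (words.take 3).map PySem.Str.lower ∈ pvPatterns then
      words.drop 3
    else words
  PySem.Str.join " " words'

-- ===== PRECONDITION & SPEC =====
def Spec_clean_response_text_py (text : String) (out : String) : Prop := out = clean_response_text_py_alt text
instance (text : String) (out : String) : Decidable (Spec_clean_response_text_py text out) := by unfold Spec_clean_response_text_py; infer_instance

-- ===== CLAIM (what is proved, stated in full; the proofs are below) =====
def Claim_equal_clean_response_text_py : Prop := ∀ (text : String), Dom_clean_response_text_py text → Spec_clean_response_text_py text (clean_response_text_py text)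

-- ===== LEMMAS AND PROOFS =====

-- a word produced by split(): nonempty and whitespace-free
def pvNice (w : List Char) : Prop := w ≠ [] ∧ ∀ c ∈ w, PySem.Chars.isspace c = false

theorem pvSplit_go_nice (s : List Char) (cur : List Char) (acc : List (List Char))
    (hc : ∀ c ∈ cur, PySem.Chars.isspace c = false)
    (ha : ∀ w ∈ acc, pvNice w) :
    ∀ w ∈ PySem.Chars.split₀.go s cur acc, pvNice w := by
  induction s generalizing cur acc with
  | nil =>
    intro w hw
    simp only [PySem.Chars.split₀.go] at hw
    split at hw
    · exact ha w (by simpa using hw)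
    · rcases (by simpa using hw : w ∈ acc ∨ w = cur.reverse) with h | h
      · exact ha w h
      · rename_i hne
        refine h ▸ ⟨by simpa using (by simpa [List.isEmpty_iff] using hne : cur ≠ []), ?_⟩
        intro c hc'
        exact hc c (by simpa using hc')
  | cons c rest ih =>
    intro w hw
    simp only [PySem.Chars.split₀.go] at hw
    by_cases hsp : PySem.Chars.isspace c = true
    · rw [if_pos hsp] at hw
      split at hw
      · exact ih [] acc (by simp) ha w hw
      · rename_i hne
        refine ih [] (cur.reverse :: acc) (by simp) ?_ w hw
        intro v hv
        rcases List.mem_cons.mp hv with rfl | hv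
        · refine ⟨by simpa using (by simpa [List.isEmpty_iff] using hne : cur ≠ []), ?_⟩
          intro d hd'
          exact hc d (by simpa using hd')
        · exact ha v hv
    · rw [if_neg hsp] at hw
      refine ih (c :: cur) acc ?_ ha w hw
      intro d hd
      rcases List.mem_cons.mp hd with rfl | hd
      · simpa using hsp
      · exact hc d hd


theorem pvSplit_nice (s : List Char) : ∀ w ∈ PySem.Chars.split₀ s, pvNice w :=
  pvSplit_go_nice s [] [] (by simp) (by simp)

theorem pvLowerChar_not_space (c : Char) (h : PySem.Chars.isspace c = false) :
    PySem.Chars.isspace (PySem.Chars.lowerChar c) = false := by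
  unfold PySem.Chars.lowerChar
  split_ifs with hu
  · have hA : 'A' ≤ c ∧ c ≤ 'Z' := by simpa [PySem.Chars.isupper] using hu
    have hlo : 65 ≤ c.toNat := hA.1
    have hhi : c.toNat ≤ 90 := hA.2
    have hval : (c.toNat + 32).isValidChar := Or.inl (by omega)
    have htn : (Char.ofNat (c.toNat + 32)).toNat = c.toNat + 32 := by
      rw [Char.ofNat, dif_pos hval]
      exact Char.toNat_ofNatAux hval
    simp only [PySem.Chars.isspace, htn]
    simp only [Bool.or_eq_false_iff, Bool.and_eq_false_iff, decide_eq_false_iff_not]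
    omega
  · exact h


theorem pvJoin_cons (w : List Char) (ws : List (List Char)) (h : ws ≠ []) :
    PySem.Chars.join [' '] (w :: ws) = w ++ ' ' :: PySem.Chars.join [' '] ws := by
  cases ws with
  | nil => exact absurd rfl h
  | cons b t =>
    rw [PySem.Chars.join_cons_cons]
    simp


theorem pvLower_join (ws : List (List Char)) :
    PySem.Chars.lower (PySem.Chars.join [' '] ws)
      = PySem.Chars.join [' '] (ws.map PySem.Chars.lower) := by
  induction ws with
  | nil => simp [PySem.Chars.join_nil, PySem.Chars.lower]
  | cons w t ih =>
    cases t with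
    | nil => simp [PySem.Chars.join_singleton]
    | cons b t' =>
      rw [pvJoin_cons w (b :: t') (by simp), List.map_cons,
        pvJoin_cons (PySem.Chars.lower w) ((b :: t').map PySem.Chars.lower) (by simp), ← ih]
      simp [PySem.Chars.lower, PySem.Chars.lowerChar, PySem.Chars.isupper]


theorem pvJoin_ne_nil (ws : List (List Char)) (h : ws ≠ []) (hn : ∀ w ∈ ws, w ≠ []) :
    PySem.Chars.join [' '] ws ≠ [] := by
  cases ws with
  | nil => exact absurd rfl h
  | cons w t =>
    have hw : w ≠ [] := hn w (by simp)
    cases t with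
    | nil => simpa [PySem.Chars.join_singleton] using hw
    | cons b t' =>
      rw [pvJoin_cons w (b :: t') (by simp)]
      simp [hw]


theorem pvJoin_head (ws : List (List Char)) (h : ∀ w ∈ ws, pvNice w) :
    ∀ c ∈ (PySem.Chars.join [' '] ws).head?, PySem.Chars.isspace c = false := by
  cases ws with
  | nil => simp [PySem.Chars.join_nil]
  | cons w t =>
    have hw := h w (by simp)
    obtain ⟨c, w', rfl⟩ := List.exists_cons_of_ne_nil hw.1
    have hjh : (PySem.Chars.join [' '] ((c :: w') :: t)).head? = some c := by
      cases t with
      | nil => simp [PySem.Chars.join_singleton]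
      | cons b t' => rw [pvJoin_cons _ (b :: t') (by simp)]; simp
    rw [hjh]
    intro d hd
    have hd' : d = c := by simpa using hd.symm
    exact hd' ▸ hw.2 c (by simp)

theorem pvJoin_getLast (ws : List (List Char)) (h : ∀ w ∈ ws, pvNice w) :
    ∀ c ∈ (PySem.Chars.join [' '] ws).getLast?, PySem.Chars.isspace c = false := by
  induction ws with
  | nil => simp [PySem.Chars.join_nil]
  | cons w t ih =>
    have hw := h w (by simp)
    cases t with
    | nil =>
      intro d hd
      rw [PySem.Chars.join_singleton] at hd
      exact hw.2 d (List.mem_of_getLast? hd)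
    | cons b t' =>
      have hne : PySem.Chars.join [' '] (b :: t') ≠ [] :=
        pvJoin_ne_nil _ (by simp) (fun v hv => (h v (List.mem_cons_of_mem _ hv)).1)
      intro d hd
      rw [pvJoin_cons w (b :: t') (by simp)] at hd
      rw [List.getLast?_append] at hd
      have : (' ' :: PySem.Chars.join [' '] (b :: t')).getLast? = (PySem.Chars.join [' '] (b :: t')).getLast? := by
        rw [show (' ' :: PySem.Chars.join [' '] (b :: t')) = [' '] ++ PySem.Chars.join [' '] (b :: t') from rfl,
          List.getLast?_append, List.getLast?_eq_some_getLast hne]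
        simp
      rw [this, List.getLast?_eq_some_getLast hne] at hd
      exact ih (fun v hv => h v (List.mem_cons_of_mem _ hv)) d (by
        rw [List.getLast?_eq_some_getLast hne]; exact hd)


theorem pvStrip_eq_self (l : List Char)
    (hh : ∀ c ∈ l.head?, PySem.Chars.isspace c = false)
    (hl : ∀ c ∈ l.getLast?, PySem.Chars.isspace c = false) :
    PySem.Chars.strip l = l := by
  unfold PySem.Chars.strip PySem.Chars.lstrip PySem.Chars.rstrip
  have h1 : l.dropWhile PySem.Chars.isspace = l := by
    cases l with
    | nil => rfl
    | cons c t =>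
      rw [List.dropWhile_cons_of_neg]
      simp only [hh c (by simp)]
      simp
  rw [h1]
  have h2 : l.reverse.dropWhile PySem.Chars.isspace = l.reverse := by
    cases hr : l.reverse with
    | nil => rfl
    | cons c t =>
      have : l.getLast? = some c := by
        rw [← List.head?_reverse, hr]; rfl
      rw [List.dropWhile_cons_of_neg]
      simp only [hl c (by simp [this])]
      simp
  rw [h2, List.reverse_reverse]


theorem pvWords_eq (p w u v : List Char)
    (hp : ∀ c ∈ p, PySem.Chars.isspace c = false)
    (hw : ∀ c ∈ w, PySem.Chars.isspace c = false) :
    ((p ++ ' ' :: u) <+: (w ++ ' ' :: v)) ↔ (p = w ∧ u <+: v) := by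
  induction p generalizing w with
  | nil =>
    cases w with
    | nil => simp
    | cons b w' =>
      simp only [List.nil_append, List.cons_append, List.cons_prefix_cons]
      constructor
      · rintro ⟨rfl, -⟩
        exact absurd (hw ' ' (by simp)) (by decide)
      · rintro ⟨h, -⟩
        exact absurd h (by simp)
  | cons a p' ih =>
    cases w with
    | nil =>
      simp only [List.cons_append, List.nil_append, List.cons_prefix_cons]
      constructor
      · rintro ⟨rfl, -⟩
        exact absurd (hp ' ' (by simp)) (by decide)
      · rintro ⟨h, -⟩
        exact absurd h (by simp)
    | cons b w' =>
      simp only [List.cons_append, List.cons_prefix_cons]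
      have hp' : ∀ c ∈ p', PySem.Chars.isspace c = false := fun c hc => hp c (by simp [hc])
      have hw' : ∀ c ∈ w', PySem.Chars.isspace c = false := fun c hc => hw c (by simp [hc])
      rw [ih w' hp' hw']
      constructor
      · rintro ⟨rfl, rfl, hu⟩
        exact ⟨rfl, hu⟩
      · rintro ⟨h, hu⟩
        obtain ⟨rfl, rfl⟩ : a = b ∧ p' = w' := by simpa using h
        exact ⟨rfl, rfl, hu⟩


theorem pvPrefix_words (ps ws : List (List Char)) (hps : ps ≠ [])
    (hp : ∀ p ∈ ps, ∀ c ∈ p, PySem.Chars.isspace c = false)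
    (hw : ∀ w ∈ ws, ∀ c ∈ w, PySem.Chars.isspace c = false) :
    ((PySem.Chars.join [' '] ps ++ [' ']) <+: PySem.Chars.join [' '] ws)
      ↔ ∃ rest, rest ≠ [] ∧ ws = ps ++ rest := by
  induction ps generalizing ws with
  | nil => exact absurd rfl hps
  | cons p ps' ih =>
    have hpw : ∀ c ∈ p, PySem.Chars.isspace c = false := hp p (by simp)
    cases ws with
    | nil =>
      simp only [PySem.Chars.join_nil]
      constructor
      · intro hpre
        have := hpre.length_le
        simp at this
      · rintro ⟨rest, hne, heq⟩
        exact absurd heq (by simp)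
    | cons w ws' =>
      have hww : ∀ c ∈ w, PySem.Chars.isspace c = false := hw w (by simp)
      cases ps' with
      | nil =>
        rw [PySem.Chars.join_singleton]
        cases ws' with
        | nil =>
          rw [PySem.Chars.join_singleton]
          constructor
          · intro hpre
            have : ' ' ∈ w := hpre.subset (by simp)
            exact absurd (hww ' ' this) (by decide)
          · rintro ⟨rest, hne, heq⟩
            obtain ⟨rfl, h2⟩ : w = p ∧ [] = rest := by simpa using heq
            exact absurd h2.symm hne
        | cons w2 t =>
          rw [pvJoin_cons w (w2 :: t) (by simp),
            show p ++ [' '] = p ++ ' ' :: ([] : List Char) from rfl,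
            pvWords_eq p w [] _ hpw hww]
          constructor
          · rintro ⟨rfl, -⟩
            exact ⟨w2 :: t, by simp⟩
          · rintro ⟨rest, hne, heq⟩
            obtain ⟨rfl, -⟩ : w = p ∧ w2 :: t = rest := by simpa using heq
            exact ⟨rfl, by simp⟩
      | cons q ps'' =>
        have hj : PySem.Chars.join [' '] (p :: q :: ps'') ++ [' ']
            = p ++ ' ' :: (PySem.Chars.join [' '] (q :: ps'') ++ [' ']) := by
          rw [PySem.Chars.join_cons_cons]
          simp
        rw [hj]
        cases ws' with
        | nil =>
          rw [PySem.Chars.join_singleton]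
          constructor
          · intro hpre
            have : ' ' ∈ w := hpre.subset (by simp)
            exact absurd (hww ' ' this) (by decide)
          · rintro ⟨rest, hne, heq⟩
            have := congrArg List.length heq
            simp at this
        | cons w2 t =>
          rw [pvJoin_cons w (w2 :: t) (by simp), pvWords_eq p w _ _ hpw hww,
            ih (w2 :: t) (by simp) (fun x hx => hp x (by simp [hx]))
              (fun x hx => hw x (by simp [hx]))]
          constructor
          · rintro ⟨rfl, rest, hne, heq⟩
            exact ⟨rest, hne, by simp [heq]⟩
          · rintro ⟨rest, hne, heq⟩
            obtain ⟨rfl, h2⟩ : w = p ∧ w2 :: t = q :: ps'' ++ rest := by simpa using heq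
            exact ⟨rfl, rest, hne, h2⟩


theorem pvCond_iff (ws : List (List Char)) (hw : ∀ w ∈ ws, pvNice w) (p1 p2 p3 : List Char)
    (h1 : ∀ c ∈ p1, PySem.Chars.isspace c = false)
    (h2 : ∀ c ∈ p2, PySem.Chars.isspace c = false)
    (h3 : ∀ c ∈ p3, PySem.Chars.isspace c = false) :
    (PySem.Chars.startswith (PySem.Chars.lower (PySem.Chars.join [' '] ws))
        (p1 ++ ' ' :: (p2 ++ ' ' :: (p3 ++ [' ']))) = true)
      ↔ (3 < ws.length ∧ (ws.map PySem.Chars.lower).take 3 = [p1, p2, p3]) := by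
  rw [PySem.Chars.startswith_iff, pvLower_join]
  have hshape : p1 ++ ' ' :: (p2 ++ ' ' :: (p3 ++ [' ']))
      = PySem.Chars.join [' '] [p1, p2, p3] ++ [' '] := by
    rw [PySem.Chars.join_cons_cons, PySem.Chars.join_cons_cons, PySem.Chars.join_singleton]
    simp
  have hpat : ∀ p ∈ [p1, p2, p3], ∀ c ∈ p, PySem.Chars.isspace c = false := by
    intro p hp c hc
    rcases (by simpa using hp : p = p1 ∨ p = p2 ∨ p = p3) with rfl | rfl | rfl
    · exact h1 c hc
    · exact h2 c hc
    · exact h3 c hc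
  have hlw : ∀ w ∈ ws.map PySem.Chars.lower, ∀ c ∈ w, PySem.Chars.isspace c = false := by
    intro w hwm c hc
    obtain ⟨v, hv, rfl⟩ := List.mem_map.mp hwm
    obtain ⟨d, hd, rfl⟩ := List.mem_map.mp hc
    exact pvLowerChar_not_space d ((hw v hv).2 d hd)
  rw [hshape, pvPrefix_words [p1, p2, p3] (ws.map PySem.Chars.lower) (by simp) hpat hlw]
  constructor
  · rintro ⟨rest, hne, heq⟩
    have hlen := congrArg List.length heq
    simp only [List.length_map, List.length_append, List.length_cons, List.length_nil] at hlen
    have hrest : 0 < rest.length := List.length_pos_of_ne_nil hne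
    refine ⟨by omega, ?_⟩
    rw [heq]
    rfl
  · rintro ⟨hlen, htake⟩
    refine ⟨(ws.map PySem.Chars.lower).drop 3, ?_, ?_⟩
    · intro hdrop
      have := congrArg List.length hdrop
      simp at this
      omega
    · rw [← htake, List.take_append_drop]


theorem pvCleaned_toList (text : String) :
    (PySem.Str.join " " (PySem.Str.split₀ text)).toList
      = PySem.Chars.join [' '] (PySem.Chars.split₀ text.toList) := by
  simp only [PySem.Str.join, PySem.Str.split₀, List.map_map]
  have : String.toList ∘ String.ofList = id := funext fun l => by simp
  simp [this]

theorem pvCondStr (text pre : String) (p1 p2 p3 : List Char)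
    (hpre : PySem.Chars.lower pre.toList = p1 ++ ' ' :: (p2 ++ ' ' :: (p3 ++ [' '])))
    (h1 : ∀ c ∈ p1, PySem.Chars.isspace c = false)
    (h2 : ∀ c ∈ p2, PySem.Chars.isspace c = false)
    (h3 : ∀ c ∈ p3, PySem.Chars.isspace c = false) :
    (PySem.Str.startswith (PySem.Str.lower (PySem.Str.join " " (PySem.Str.split₀ text)))
        (PySem.Str.lower pre) = true)
      ↔ (3 < (PySem.Chars.split₀ text.toList).length
          ∧ ((PySem.Chars.split₀ text.toList).map PySem.Chars.lower).take 3 = [p1, p2, p3]) := by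
  simp only [PySem.Str.startswith, PySem.Str.lower]
  rw [show ((String.ofList (PySem.Chars.lower (PySem.Str.join " " (PySem.Str.split₀ text)).toList)).toList)
      = PySem.Chars.lower (PySem.Str.join " " (PySem.Str.split₀ text)).toList by simp]
  rw [show ((String.ofList (PySem.Chars.lower pre.toList)).toList)
      = PySem.Chars.lower pre.toList by simp]
  rw [pvCleaned_toList, hpre]
  exact pvCond_iff _ (pvSplit_nice text.toList) p1 p2 p3 h1 h2 h3

theorem pvStripJoin (text : String) :
    PySem.Str.strip (PySem.Str.join " " (PySem.Str.split₀ text))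
      = PySem.Str.join " " (PySem.Str.split₀ text) := by
  rw [← String.toList_inj]
  simp only [PySem.Str.strip]
  rw [show ((String.ofList (PySem.Chars.strip (PySem.Str.join " " (PySem.Str.split₀ text)).toList)).toList)
      = PySem.Chars.strip (PySem.Str.join " " (PySem.Str.split₀ text)).toList by simp]
  rw [pvCleaned_toList]
  exact pvStrip_eq_self _ (pvJoin_head _ (pvSplit_nice text.toList))
    (pvJoin_getLast _ (pvSplit_nice text.toList))

theorem pvPos_char (ws : List (List Char)) (hw : ∀ w ∈ ws, pvNice w) (p1 p2 p3 : List Char)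
    (hlen : 3 < ws.length)
    (htake : (ws.map PySem.Chars.lower).take 3 = [p1, p2, p3]) :
    PySem.Chars.strip
        (List.drop (p1.length + p2.length + p3.length + 3) (PySem.Chars.join [' '] ws))
      = PySem.Chars.join [' '] (ws.drop 3) := by
  rcases ws with _ | ⟨w1, ws1⟩
  · simp at hlen
  rcases ws1 with _ | ⟨w2, ws2⟩
  · simp at hlen
  rcases ws2 with _ | ⟨w3, rest⟩
  · simp at hlen
  have hrest : rest ≠ [] := by
    intro h
    subst h
    simp at hlen
  obtain ⟨e1, e2, e3⟩ : PySem.Chars.lower w1 = p1 ∧ PySem.Chars.lower w2 = p2 ∧ PySem.Chars.lower w3 = p3 := by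
    simpa using htake
  have hl1 : w1.length = p1.length := by rw [← e1]; simp [PySem.Chars.lower]
  have hl2 : w2.length = p2.length := by rw [← e2]; simp [PySem.Chars.lower]
  have hl3 : w3.length = p3.length := by rw [← e3]; simp [PySem.Chars.lower]
  rw [pvJoin_cons w1 _ (by simp), pvJoin_cons w2 _ (by simp), pvJoin_cons w3 rest hrest]
  have hsplit : w1 ++ ' ' :: (w2 ++ ' ' :: (w3 ++ ' ' :: PySem.Chars.join [' '] rest))
      = (w1 ++ ' ' :: (w2 ++ ' ' :: (w3 ++ [' ']))) ++ PySem.Chars.join [' '] rest := by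
    simp
  have hn : (w1 ++ ' ' :: (w2 ++ ' ' :: (w3 ++ [' ']))).length
      = p1.length + p2.length + p3.length + 3 := by
    simp [hl1, hl2, hl3]
    omega
  rw [hsplit, ← hn, List.drop_left]
  have hnr : ∀ w ∈ rest, pvNice w := fun w hmem => hw w (by simp [hmem])
  rw [show ((w1 :: w2 :: w3 :: rest).drop 3) = rest from rfl]
  exact pvStrip_eq_self _ (pvJoin_head _ hnr) (pvJoin_getLast _ hnr)

theorem pvPosStr (text pre : String) (p1 p2 p3 : List Char)
    (hpre : PySem.Chars.lower pre.toList = p1 ++ ' ' :: (p2 ++ ' ' :: (p3 ++ [' '])))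
    (hlen : 3 < (PySem.Chars.split₀ text.toList).length)
    (htake : ((PySem.Chars.split₀ text.toList).map PySem.Chars.lower).take 3 = [p1, p2, p3]) :
    PySem.Str.strip ("" ++ PySem.Str.slice (PySem.Str.join " " (PySem.Str.split₀ text))
        (some (PySem.Str.len pre)) none)
      = PySem.Str.join " " ((PySem.Str.split₀ text).drop 3) := by
  rw [← String.toList_inj]
  have hstrip : ∀ x : String, (PySem.Str.strip x).toList = PySem.Chars.strip x.toList := by
    intro x
    simp [PySem.Str.strip]
  rw [hstrip]
  have harg : ("" ++ PySem.Str.slice (PySem.Str.join " " (PySem.Str.split₀ text))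
      (some (PySem.Str.len pre)) none).toList
      = List.drop pre.toList.length (PySem.Chars.join [' '] (PySem.Chars.split₀ text.toList)) := by
    have h0 : ("" ++ PySem.Str.slice (PySem.Str.join " " (PySem.Str.split₀ text))
        (some (PySem.Str.len pre)) none).toList
        = (PySem.Str.slice (PySem.Str.join " " (PySem.Str.split₀ text))
            (some (PySem.Str.len pre)) none).toList := by
      simp
    rw [h0]
    simp only [PySem.Str.slice]
    rw [show ((String.ofList (PySem.Chars.slice (PySem.Str.join " " (PySem.Str.split₀ text)).toList
        (some (PySem.Str.len pre)) none)).toList)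
        = PySem.Chars.slice (PySem.Str.join " " (PySem.Str.split₀ text)).toList
            (some (PySem.Str.len pre)) none by simp]
    rw [show PySem.Str.len pre = ((pre.toList.length : Nat) : Int) from rfl]
    rw [PySem.Chars.slice_eq_listSlice, PySem.List.slice_from_natCast, pvCleaned_toList]
  rw [harg]
  have hn : pre.toList.length = p1.length + p2.length + p3.length + 3 := by
    have hle := congrArg List.length hpre
    simp only [PySem.Chars.lower, List.length_map, List.length_append, List.length_cons, List.length_nil] at hle
    omega
  rw [hn]
  have hrhs : (PySem.Str.join " " ((PySem.Str.split₀ text).drop 3)).toList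
      = PySem.Chars.join [' '] ((PySem.Chars.split₀ text.toList).drop 3) := by
    simp only [PySem.Str.join, PySem.Str.split₀, ← List.map_drop, List.map_map]
    have hid : String.toList ∘ String.ofList = id := funext fun l => by simp
    simp [hid]
  rw [hrhs]
  exact pvPos_char _ (pvSplit_nice text.toList) p1 p2 p3 hlen htake


theorem pvMapOfList3 (M : List (List Char)) (s1 s2 s3 : String) :
    M.map String.ofList = [s1, s2, s3] ↔ M = [s1.toList, s2.toList, s3.toList] := by
  constructor
  · intro h
    have hmap := congrArg (List.map String.toList) h
    have hid : String.toList ∘ String.ofList = id := funext fun l => by simp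
    simpa [List.map_map, hid] using hmap
  · rintro rfl
    simp

theorem pvAlt_cond (text : String) :
    (3 < (PySem.Str.split₀ text).length
        ∧ ((PySem.Str.split₀ text).take 3).map PySem.Str.lower ∈ pvPatterns)
      ↔ ((3 < (PySem.Chars.split₀ text.toList).length)
          ∧ (((PySem.Chars.split₀ text.toList).map PySem.Chars.lower).take 3
                = ["this".toList, "screenshot".toList, "shows".toList]
            ∨ ((PySem.Chars.split₀ text.toList).map PySem.Chars.lower).take 3
                = ["this".toList, "screenshot".toList, "is".toList]
            ∨ ((PySem.Chars.split₀ text.toList).map PySem.Chars.lower).take 3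
                = ["this".toList, "screenshot".toList, "contains".toList]
            ∨ ((PySem.Chars.split₀ text.toList).map PySem.Chars.lower).take 3
                = ["this".toList, "image".toList, "shows".toList]
            ∨ ((PySem.Chars.split₀ text.toList).map PySem.Chars.lower).take 3
                = ["this".toList, "image".toList, "is".toList]
            ∨ ((PySem.Chars.split₀ text.toList).map PySem.Chars.lower).take 3
                = ["this".toList, "image".toList, "contains".toList]
            ∨ ((PySem.Chars.split₀ text.toList).map PySem.Chars.lower).take 3
                = ["the".toList, "screenshot".toList, "shows".toList]
            ∨ ((PySem.Chars.split₀ text.toList).map PySem.Chars.lower).take 3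
                = ["the".toList, "image".toList, "shows".toList])) := by
  have hlen : (PySem.Str.split₀ text).length = (PySem.Chars.split₀ text.toList).length := by
    simp [PySem.Str.split₀]
  have hcomp : PySem.Str.lower ∘ String.ofList = String.ofList ∘ PySem.Chars.lower := by
    funext w
    simp [PySem.Str.lower, Function.comp]
  have hM : ((PySem.Str.split₀ text).take 3).map PySem.Str.lower
      = (((PySem.Chars.split₀ text.toList).map PySem.Chars.lower).take 3).map String.ofList := by
    simp only [PySem.Str.split₀, ← List.map_take, List.map_map, hcomp]
  rw [hlen, hM]
  refine and_congr Iff.rfl ?_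
  simp only [pvPatterns, List.mem_cons, List.not_mem_nil, or_false, pvMapOfList3]


-- ===== VERDICT (by name: the statement is the Claim_ definition above) =====
set_option maxRecDepth 8192 in
theorem clean_response_text_py_spec : Claim_equal_clean_response_text_py := by
  intro text _
  unfold Spec_clean_response_text_py
  have hc1 := pvCondStr text "This screenshot shows " "this".toList "screenshot".toList "shows".toList (by decide) (by simp [PySem.Chars.isspace]) (by simp [PySem.Chars.isspace]) (by simp [PySem.Chars.isspace])
  have hc2 := pvCondStr text "This screenshot is " "this".toList "screenshot".toList "is".toList (by decide) (by simp [PySem.Chars.isspace]) (by simp [PySem.Chars.isspace]) (by simp [PySem.Chars.isspace])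
  have hc3 := pvCondStr text "This screenshot contains " "this".toList "screenshot".toList "contains".toList (by decide) (by simp [PySem.Chars.isspace]) (by simp [PySem.Chars.isspace]) (by simp [PySem.Chars.isspace])
  have hc4 := pvCondStr text "This image shows " "this".toList "image".toList "shows".toList (by decide) (by simp [PySem.Chars.isspace]) (by simp [PySem.Chars.isspace]) (by simp [PySem.Chars.isspace])
  have hc5 := pvCondStr text "This image is " "this".toList "image".toList "is".toList (by decide) (by simp [PySem.Chars.isspace]) (by simp [PySem.Chars.isspace]) (by simp [PySem.Chars.isspace])
  have hc6 := pvCondStr text "This image contains " "this".toList "image".toList "contains".toList (by decide) (by simp [PySem.Chars.isspace]) (by simp [PySem.Chars.isspace]) (by simp [PySem.Chars.isspace])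
  have hc7 := pvCondStr text "The screenshot shows " "the".toList "screenshot".toList "shows".toList (by decide) (by simp [PySem.Chars.isspace]) (by simp [PySem.Chars.isspace]) (by simp [PySem.Chars.isspace])
  have hc8 := pvCondStr text "The image shows " "the".toList "image".toList "shows".toList (by decide) (by simp [PySem.Chars.isspace]) (by simp [PySem.Chars.isspace]) (by simp [PySem.Chars.isspace])
  have hB := pvAlt_cond text
  show clean_response_text_py text = clean_response_text_py_alt text
  simp only [clean_response_text_py, clean_response_text_py_alt, pvCleanLoop, pvReplacements]
  simp only [hc1, hc2, hc3, hc4, hc5, hc6, hc7, hc8, hB]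
  split_ifs with g1 gB g2 gB g3 gB g4 gB g5 gB g6 gB g7 gB g8 gB gB
  · exact pvPosStr text "This screenshot shows " _ _ _ (by decide) g1.1 g1.2
  · exact absurd ⟨g1.1, Or.inl g1.2⟩ gB
  · exact pvPosStr text "This screenshot is " _ _ _ (by decide) g2.1 g2.2
  · exact absurd ⟨g2.1, Or.inr (Or.inl g2.2)⟩ gB
  · exact pvPosStr text "This screenshot contains " _ _ _ (by decide) g3.1 g3.2
  · exact absurd ⟨g3.1, Or.inr (Or.inr (Or.inl g3.2))⟩ gB
  · exact pvPosStr text "This image shows " _ _ _ (by decide) g4.1 g4.2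
  · exact absurd ⟨g4.1, Or.inr (Or.inr (Or.inr (Or.inl g4.2)))⟩ gB
  · exact pvPosStr text "This image is " _ _ _ (by decide) g5.1 g5.2
  · exact absurd ⟨g5.1, Or.inr (Or.inr (Or.inr (Or.inr (Or.inl g5.2))))⟩ gB
  · exact pvPosStr text "This image contains " _ _ _ (by decide) g6.1 g6.2
  · exact absurd ⟨g6.1, Or.inr (Or.inr (Or.inr (Or.inr (Or.inr (Or.inl g6.2)))))⟩ gB
  · exact pvPosStr text "The screenshot shows " _ _ _ (by decide) g7.1 g7.2
  · exact absurd ⟨g7.1, Or.inr (Or.inr (Or.inr (Or.inr (Or.inr (Or.inr (Or.inl g7.2))))))⟩ gB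
  · exact pvPosStr text "The image shows " _ _ _ (by decide) g8.1 g8.2
  · exact absurd ⟨g8.1, Or.inr (Or.inr (Or.inr (Or.inr (Or.inr (Or.inr (Or.inr g8.2))))))⟩ gB
  · rcases gB with ⟨hl, hd⟩
    rcases hd with h | h | h | h | h | h | h | h
    · exact absurd ⟨hl, h⟩ g1
    · exact absurd ⟨hl, h⟩ g2
    · exact absurd ⟨hl, h⟩ g3
    · exact absurd ⟨hl, h⟩ g4
    · exact absurd ⟨hl, h⟩ g5
    · exact absurd ⟨hl, h⟩ g6
    · exact absurd ⟨hl, h⟩ g7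
    · exact absurd ⟨hl, h⟩ g8
  · exact pvStripJoin text
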